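-- pv_equiv track=rewrite | github.com/a107230AnaRitaCosta/ATP2024 | TP7/TPC7.py | maxPeriodoCalor
-- ===== SOURCE A (Python) =====
-- def maxPeriodoCalor(tabMeteo, p):
--     consec_local=0
--     consec_global=0
--     for dia in tabMeteo:
--         if dia[3]<p:
--             consec_local=consec_local+1
--         else:
--             if consec_local> consec_global:
--                 consec_global=consec_local
--             consec_local=0
--     if consec_local> consec_global:
--                 consec_global=consec_local
--     return consec_global
-- ===== SOURCE B (Python) =====
-- def maxPeriodoCalor(tabMeteo, p):
--     # Split at the first day not below the threshold: the answer is the max of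
--     # the leading below-threshold run and the answer for the remaining days.
--     k = 0
--     while k < len(tabMeteo) and tabMeteo[k][3] < p:
--         k += 1
--     if k == len(tabMeteo):
--         return k
--     return max(k, maxPeriodoCalor(tabMeteo[k + 1:], p))
-- ===== Notes on version B (the rewrite author's own statement) =====
-- stated objective: alternative
-- what changed: Replaces A's running-counter-with-trailing-flush scan by a divide-and-conquer recursion: count the leading below-threshold run, then recurse on the days after the first failing day and take the max.
import Mathlib
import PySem

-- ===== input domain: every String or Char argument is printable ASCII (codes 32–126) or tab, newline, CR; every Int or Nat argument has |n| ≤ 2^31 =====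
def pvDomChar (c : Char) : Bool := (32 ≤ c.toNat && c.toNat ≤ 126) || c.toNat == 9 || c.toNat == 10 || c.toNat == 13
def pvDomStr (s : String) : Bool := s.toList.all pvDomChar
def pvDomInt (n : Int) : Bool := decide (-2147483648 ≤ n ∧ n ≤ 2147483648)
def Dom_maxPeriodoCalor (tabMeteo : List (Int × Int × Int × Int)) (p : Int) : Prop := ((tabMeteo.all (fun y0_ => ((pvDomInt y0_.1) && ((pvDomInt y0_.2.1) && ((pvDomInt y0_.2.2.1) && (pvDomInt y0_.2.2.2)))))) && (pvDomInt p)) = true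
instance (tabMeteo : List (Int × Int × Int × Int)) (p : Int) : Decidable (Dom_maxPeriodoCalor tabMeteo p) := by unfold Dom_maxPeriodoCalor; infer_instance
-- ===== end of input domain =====

-- B replaces A's running-counter scan by a divide-and-conquer recursion on the first failing day (alternative decomposition, same cost).


-- ===== PORT A =====
-- literal transliteration: fold over the days carrying (consec_local, consec_global), final flush.
def maxPeriodoCalor (tabMeteo : List (Int × Int × Int × Int)) (p : Int) : Int :=
  let s := tabMeteo.foldl
    (fun (st : Int × Int) dia =>
      if dia.2.2.2 < p then (st.1 + 1, st.2)
      else (if st.1 > st.2 then (0, st.1) else (0, st.2)))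
    ((0 : Int), (0 : Int))
  if s.1 > s.2 then s.1 else s.2

-- ===== PORT B =====
-- the counting while-loop of Source B is the length of the takeWhile prefix; tabMeteo[k+1:] is List.drop (k+1).
def maxPeriodoCalor_alt (tabMeteo : List (Int × Int × Int × Int)) (p : Int) : Int :=
  let k := (tabMeteo.takeWhile (fun dia => decide (dia.2.2.2 < p))).length
  if k = tabMeteo.length then (k : Int)
  else max (k : Int) (maxPeriodoCalor_alt (tabMeteo.drop (k + 1)) p)
termination_by tabMeteo.length
decreasing_by
  have hk : (tabMeteo.takeWhile (fun dia => decide (dia.2.2.2 < p))).length ≤ tabMeteo.length :=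
    (List.takeWhile_sublist _).length_le
  simp only [List.length_drop]
  omega

-- ===== PRECONDITION & SPEC =====
def Spec_maxPeriodoCalor (tabMeteo : List (Int × Int × Int × Int)) (p : Int) (out : Int) : Prop := out = maxPeriodoCalor_alt tabMeteo p
instance (tabMeteo : List (Int × Int × Int × Int)) (p : Int) (out : Int) : Decidable (Spec_maxPeriodoCalor tabMeteo p out) := by unfold Spec_maxPeriodoCalor; infer_instance

-- ===== CLAIM (what is proved, stated in full; the proofs are below) =====
def Claim_equal_maxPeriodoCalor : Prop := ∀ (tabMeteo : List (Int × Int × Int × Int)) (p : Int), Dom_maxPeriodoCalor tabMeteo p → Spec_maxPeriodoCalor tabMeteo p (maxPeriodoCalor tabMeteo p)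

-- ===== LEMMAS AND PROOFS =====

-- A's loop body and "fold then flush" as standalone functions, for the invariant.
def stepA (p : Int) (st : Int × Int) (dia : Int × Int × Int × Int) : Int × Int :=
  if dia.2.2.2 < p then (st.1 + 1, st.2)
  else (if st.1 > st.2 then (0, st.1) else (0, st.2))

def runA (p : Int) (tab : List (Int × Int × Int × Int)) (st : Int × Int) : Int :=
  let s := tab.foldl (stepA p) st
  if s.1 > s.2 then s.1 else s.2

lemma alt_nonneg (tab : List (Int × Int × Int × Int)) (p : Int) :
    0 ≤ maxPeriodoCalor_alt tab p := by
  fun_induction maxPeriodoCalor_alt tab p with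
  | case1 tab k hk => positivity
  | case2 tab k hk ih => exact le_trans ih (le_max_right _ _)

lemma alt_unfold (tab : List (Int × Int × Int × Int)) (p : Int) :
    maxPeriodoCalor_alt tab p =
      max ((tab.takeWhile (fun dia => decide (dia.2.2.2 < p))).length : Int)
        (maxPeriodoCalor_alt (tab.drop ((tab.takeWhile (fun dia => decide (dia.2.2.2 < p))).length + 1)) p) := by
  rw [maxPeriodoCalor_alt]
  split
  · next h =>
    rw [List.drop_eq_nil_of_le (by omega)]
    rw [maxPeriodoCalor_alt]
    simp
  · rfl

lemma key (n : ℕ) : ∀ (tab : List (Int × Int × Int × Int)) (p l g : Int),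
    tab.length ≤ n → 0 ≤ l →
    runA p tab (l, g) =
      max g (max (l + ((tab.takeWhile (fun dia => decide (dia.2.2.2 < p))).length : Int))
        (maxPeriodoCalor_alt (tab.drop ((tab.takeWhile (fun dia => decide (dia.2.2.2 < p))).length + 1)) p)) := by
  induction n with
  | zero =>
    intro tab p l g hn hl
    have : tab = [] := List.eq_nil_of_length_eq_zero (by omega)
    subst this
    simp only [runA, List.foldl_nil, List.takeWhile_nil, List.drop_nil, List.length_nil]
    rw [maxPeriodoCalor_alt]
    simp only [List.takeWhile_nil, List.length_nil, List.length_nil]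
    norm_num
    omega
  | succ m ih =>
    intro tab p l g hn hl
    cases tab with
    | nil =>
      simp only [runA, List.foldl_nil, List.takeWhile_nil, List.drop_nil, List.length_nil]
      rw [maxPeriodoCalor_alt]
      simp only [List.takeWhile_nil, List.length_nil]
      norm_num
      omega
    | cons a rest =>
      by_cases hc : a.2.2.2 < p
      · -- below threshold: run grows
        have hstep : stepA p (l, g) a = (l + 1, g) := by simp [stepA, hc]
        have htw : (a :: rest).takeWhile (fun dia => decide (dia.2.2.2 < p)) =
            a :: rest.takeWhile (fun dia => decide (dia.2.2.2 < p)) := by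
          simp [hc]
        have hrun : runA p (a :: rest) (l, g) = runA p rest (l + 1, g) := by
          simp [runA, hstep]
        rw [hrun, ih rest p (l + 1) g (by simpa using Nat.le_of_succ_le_succ hn) (by omega), htw]
        simp only [List.length_cons, List.drop_succ_cons]
        push_cast
        ring_nf
      · -- first failing day: flush and restart
        have hstep : stepA p (l, g) a = (0, if l > g then l else g) := by
          by_cases hlg : l > g <;> simp [stepA, hc, hlg]
        have htw : (a :: rest).takeWhile (fun dia => decide (dia.2.2.2 < p)) = [] := by
          simp [hc]
        have hrun : runA p (a :: rest) (l, g) = runA p rest (0, if l > g then l else g) := by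
          simp [runA, hstep]
        rw [hrun, ih rest p 0 (if l > g then l else g) (by simpa using Nat.le_of_succ_le_succ hn) le_rfl,
          htw]
        simp only [List.length_nil, Nat.cast_zero, zero_add, List.drop_succ_cons, List.drop_zero]
        rw [alt_unfold rest p]
        generalize (maxPeriodoCalor_alt
          (rest.drop ((rest.takeWhile (fun dia => decide (dia.2.2.2 < p))).length + 1)) p) = B
        generalize ((rest.takeWhile (fun dia => decide (dia.2.2.2 < p))).length : Int) = T
        split_ifs with hlg <;> omega

-- ===== VERDICT (by name: the statement is the Claim_ definition above) =====
theorem maxPeriodoCalor_spec : Claim_equal_maxPeriodoCalor := by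
  intro tab p _
  unfold Spec_maxPeriodoCalor
  have h := key tab.length tab p 0 0 le_rfl le_rfl
  have hA : maxPeriodoCalor tab p = runA p tab (0, 0) := rfl
  rw [hA, h, alt_unfold tab p]
  have hB := alt_nonneg (tab.drop ((tab.takeWhile (fun dia => decide (dia.2.2.2 < p))).length + 1)) p
  generalize (maxPeriodoCalor_alt
    (tab.drop ((tab.takeWhile (fun dia => decide (dia.2.2.2 < p))).length + 1)) p) = B at hB ⊢
  generalize ((tab.takeWhile (fun dia => decide (dia.2.2.2 < p))).length : Int) = T
  omega
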